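-- pv_equiv track=rewrite | github.com/Ratnesh20/Algo-Coding | 04-April/14/Q1. Sum the Difference.py | solve
-- ===== SOURCE A (Python) =====
-- def solve(A):
--     A.sort()
--     n = len(A)
--     m = 1000000007
--     count = 0
--     for i in range(n):
--         count += (2**(i) - 2**(n-i-1))*A[i]
--
--     # count = sum((2**(i) - 2**(n-i-1))*A[i] for i in range(n))
--
--     return count%m
-- ===== SOURCE B (Python) =====
-- def solve(A):
--     A.sort()
--     hi = 0
--     for x in reversed(A):   # Horner: hi = sum(2**i * A[i])
--         hi = 2 * hi + x
--     lo = 0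
--     for x in A:             # Horner: lo = sum(2**(n-1-i) * A[i])
--         lo = 2 * lo + x
--     return (hi - lo) % 1000000007
-- ===== Notes on version B (the rewrite author's own statement) =====
-- stated objective: faster
-- what changed: B replaces A's indexed loop that recomputes 2**i and 2**(n-i-1) each step by two index-free Horner evaluations (acc = 2*acc + x) over the sorted list and its reverse, subtracting the two base-2 polynomial values; no power is ever formed explicitly.
import Mathlib
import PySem

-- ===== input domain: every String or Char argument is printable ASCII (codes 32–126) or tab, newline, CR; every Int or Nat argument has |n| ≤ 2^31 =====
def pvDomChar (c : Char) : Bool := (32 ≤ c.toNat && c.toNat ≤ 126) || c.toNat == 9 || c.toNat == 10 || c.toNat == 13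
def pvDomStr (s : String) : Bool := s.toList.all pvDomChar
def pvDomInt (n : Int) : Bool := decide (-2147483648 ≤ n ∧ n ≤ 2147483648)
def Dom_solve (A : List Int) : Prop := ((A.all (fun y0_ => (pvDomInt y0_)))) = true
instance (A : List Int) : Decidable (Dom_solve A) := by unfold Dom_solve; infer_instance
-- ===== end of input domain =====

-- B replaces A's indexed loop recomputing 2**i and 2**(n-i-1) by two index-free Horner
-- evaluations over the sorted list and its reverse; equivalence is about the RETURN value
-- (both Pythons sort the argument in place, the same observable mutation).

-- ===== PORT A =====
def solve (A : List Int) : Int :=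
  let s := PySem.List.sorted A (fun x => x) false
  let n : Int := s.length
  let m : Int := 1000000007
  let count : Int :=
    (PySem.List.pyRange 0 n 1).foldl
      (fun count i =>
        count + ((2 : Int) ^ i.toNat - (2 : Int) ^ (n - i - 1).toNat) * PySem.List.pyGetD s i 0)
      0
  PySem.Int.mod count m

-- ===== PORT B =====
def solve_alt (A : List Int) : Int :=
  let s := PySem.List.sorted A (fun x => x) false
  let hi := s.reverse.foldl (fun acc x => 2 * acc + x) 0
  let lo := s.foldl (fun acc x => 2 * acc + x) 0
  PySem.Int.mod (hi - lo) 1000000007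

-- ===== PRECONDITION & SPEC =====
def Spec_solve (A : List Int) (out : Int) : Prop := out = solve_alt A
instance (A : List Int) (out : Int) : Decidable (Spec_solve A out) := by unfold Spec_solve; infer_instance

-- ===== CLAIM (what is proved, stated in full; the proofs are below) =====
def Claim_equal_solve : Prop := ∀ (A : List Int), Dom_solve A → Spec_solve A (solve A)

-- ===== LEMMAS AND PROOFS =====

-- A's loop is the plain sum of its terms.
theorem pvA_fold (s : List Int) (nn : Nat) :
    (List.range nn).foldl
      (fun count (k : Nat) =>
        count + ((2 : Int) ^ k
          - (2 : Int) ^ (((nn : Int)) - (k : Int) - 1).toNat) * PySem.List.pyGetD s (k : Int) 0)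
      0
    = ∑ k ∈ Finset.range nn,
        ((2 : Int) ^ k
          - (2 : Int) ^ (((nn : Int)) - (k : Int) - 1).toNat) * PySem.List.pyGetD s (k : Int) 0 := by
  rw [PySem.List.foldl_add, zero_add]
  rfl

-- Horner's rule: the shift-and-add fold evaluates the base-2 polynomial of the list.
theorem pvHorner (l : List Int) (c : Int) :
    l.foldl (fun acc x => 2 * acc + x) c
    = c * 2 ^ l.length + ∑ k ∈ Finset.range l.length, 2 ^ (l.length - 1 - k) * l.getD k 0 := by
  induction l generalizing c with
  | nil => simp
  | cons x t ih =>
      rw [List.foldl_cons, ih, List.length_cons, Finset.sum_range_succ']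
      have h1 : ∀ k ∈ Finset.range t.length,
          (2 : Int) ^ (t.length + 1 - 1 - (k + 1)) * (x :: t).getD (k + 1) 0
          = 2 ^ (t.length - 1 - k) * t.getD k 0 := by
        intro k hk
        have hk' : k < t.length := Finset.mem_range.mp hk
        have e : t.length + 1 - 1 - (k + 1) = t.length - 1 - k := by omega
        rw [List.getD_cons_succ, e]
      rw [Finset.sum_congr rfl h1]
      simp [pow_succ]
      ring

-- the reversed Horner pass gives the forward-weighted sum Σ 2^k · s[k].
theorem pvHi (s : List Int) :
    s.reverse.foldl (fun acc x => 2 * acc + x) 0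
    = ∑ k ∈ Finset.range s.length, 2 ^ k * s.getD k 0 := by
  rw [pvHorner, zero_mul, zero_add, List.length_reverse]
  rw [← Finset.sum_range_reflect (fun k => (2 : Int) ^ k * s.getD k 0) s.length]
  refine Finset.sum_congr rfl ?_
  intro k hk
  have hk' : k < s.length := Finset.mem_range.mp hk
  have h1 : s.reverse.getD k 0 = s.getD (s.length - 1 - k) 0 := by
    rw [List.getD_eq_getElem?_getD, List.getD_eq_getElem?_getD, List.getElem?_reverse hk']
  rw [h1]

-- ===== VERDICT (by name: the statement is the Claim_ definition above) =====
theorem solve_spec : Claim_equal_solve := by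
  intro A _
  unfold Spec_solve solve solve_alt
  set s := PySem.List.sorted A (fun x => x) false with hs
  simp only [PySem.List.pyRange_one, Int.sub_zero, Int.toNat_natCast, List.foldl_map, zero_add]
  rw [pvA_fold s s.length, pvHi s, pvHorner s 0, zero_mul, zero_add]
  congr 1
  have hsplit : ∀ k ∈ Finset.range s.length,
      ((2 : Int) ^ k - (2 : Int) ^ (((s.length : Int)) - (k : Int) - 1).toNat)
        * PySem.List.pyGetD s (k : Int) 0
      = 2 ^ k * s.getD k 0 - 2 ^ (s.length - 1 - k) * s.getD k 0 := by
    intro k hk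
    have hk' : k < s.length := Finset.mem_range.mp hk
    have h2 : (((s.length : Int)) - (k : Int) - 1).toNat = s.length - 1 - k := by omega
    rw [h2, PySem.List.pyGetD_natCast]
    ring
  rw [Finset.sum_congr rfl hsplit, Finset.sum_sub_distrib]
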